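-- pv_equiv track=rewrite | github.com/ZYX-MLer/AGNetwork | src/BRDataTransform.py | split_idx
-- ===== SOURCE A (Python) =====
-- def split_idx(vec):
--
--     num_vec = len(vec)
--     all_idx = [] if vec[0] == 0 else [0]
--     for i in range(1, num_vec):
--         if vec[i - 1] == 0 and vec[i] != 0:
--             all_idx.append(i)
--         elif vec[i - 1] != 0 and vec[i] == 0:
--             all_idx.append(i)
--     all_idx = all_idx if vec[-1] == 0 else all_idx + [num_vec]
--
--     assert len(all_idx) % 2 == 0
--     all_idx = [[all_idx[i * 2], all_idx[i * 2 + 1]] for i in range(len(all_idx) // 2)]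
--
--     all_dif = [v[1] - v[0] for v in all_idx]
--
--     return  all_idx[all_dif.index(max(all_dif))]
-- ===== SOURCE B (Python) =====
-- def split_idx(vec):
--     # Single scan: track start of current nonzero run and best [start, end) so far
--     # (replace only when strictly longer, to keep the first longest run).
--     best = None
--     cur = None
--     for i, x in enumerate(vec):
--         if x != 0:
--             if cur is None:
--                 cur = i
--         else:
--             if cur is not None:
--                 if best is None or i - cur > best[1] - best[0]:
--                     best = [cur, i]
--                 cur = None
--     if cur is not None:
--         n = len(vec)
--         if best is None or n - cur > best[1] - best[0]:
--             best = [cur, n]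
--     if best is None:
--         raise ValueError("no nonzero run")
--     return best
-- ===== Notes on version B (the rewrite author's own statement) =====
-- stated objective: alternative
-- what changed: B replaces A's three-pass pipeline (build a flat boundary-index list, chunk it into [start,end] pairs, then argmax via max()+list.index()) with a single scan that keeps the start of the current nonzero run and the best run so far, updating only on a strictly longer run to preserve A's first-longest tie-break.
import Mathlib
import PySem

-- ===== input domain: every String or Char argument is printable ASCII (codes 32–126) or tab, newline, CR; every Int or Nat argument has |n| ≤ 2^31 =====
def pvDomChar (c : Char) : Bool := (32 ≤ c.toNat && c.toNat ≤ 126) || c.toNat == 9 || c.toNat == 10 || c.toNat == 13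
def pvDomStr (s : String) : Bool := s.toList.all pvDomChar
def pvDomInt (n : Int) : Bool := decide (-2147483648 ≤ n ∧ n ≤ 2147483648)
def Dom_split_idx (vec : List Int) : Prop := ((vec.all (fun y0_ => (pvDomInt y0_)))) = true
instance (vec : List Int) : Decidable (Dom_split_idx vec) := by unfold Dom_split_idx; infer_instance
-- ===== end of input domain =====

-- B changes the decomposition: one linear scan keeping the current run start and the
-- best run so far, instead of A's boundary-list / pairing / argmax pipeline ("alternative").

-- ===== PORT A =====
-- loop body of A's `for i in range(1, num_vec)` (named so the proofs can refer to it)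
def Astep (vec : List Int) (acc : List Int) (i : Int) : List Int :=
  match PySem.List.pyGet? vec (i - 1), PySem.List.pyGet? vec i with
  | some a, some b =>
    if a = 0 ∧ b ≠ 0 then acc ++ [i]
    else if a ≠ 0 ∧ b = 0 then acc ++ [i]
    else acc
  | _, _ => acc

def split_idx (vec : List Int) : List Int :=
  match PySem.List.pyGet? vec 0 with
  | none => []   -- vec[0] raises IndexError on empty vec (excluded by Pre_)
  | some v0 =>
    let num_vec : Int := (vec.length : Int)
    let init : List Int := if v0 = 0 then [] else [0]
    let all1 : List Int := (PySem.List.pyRange 1 num_vec 1).foldl (Astep vec) init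
    let all2 : List Int :=
      match PySem.List.pyGet? vec (-1) with
      | some last => if last = 0 then all1 else all1 ++ [num_vec]
      | none => all1
    -- the `assert len(all_idx) % 2 == 0` always succeeds here (all2 is a flat list of pairs)
    let pairs : List (List Int) :=
      (PySem.List.pyRange 0 (PySem.Int.floordiv ((all2.length : Int)) 2) 1).map
        (fun i => [PySem.List.pyGetD all2 (i * 2) 0, PySem.List.pyGetD all2 (i * 2 + 1) 0])
    let all_dif : List Int := pairs.map (fun v => PySem.List.pyGetD v 1 0 - PySem.List.pyGetD v 0 0)
    match PySem.List.max? all_dif (fun y => y) with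
    | none => []   -- max([]) raises ValueError on an all-zero vec (excluded by Pre_)
    | some m =>
      match PySem.List.index? all_dif m with
      | some j => (PySem.List.pyGet? pairs (j : Int)).getD []
      | none => []

-- ===== PORT B =====
-- close the nonzero run [c, i): keep `best` unless the new run is strictly longer
def bClose (best : Option (Int × Int)) (c i : Int) : Option (Int × Int) :=
  match best with
  | none => some (c, i)
  | some b => if i - c > b.2 - b.1 then some (c, i) else best

-- loop body of B's scan; state = (best run so far, start of current run if inside one)
def bStep (st : Option (Int × Int) × Option Int) (p : Int × Int) :
    Option (Int × Int) × Option Int :=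
  if p.2 ≠ 0 then
    match st.2 with
    | none => (st.1, some p.1)
    | some _ => st
  else
    match st.2 with
    | none => st
    | some c => (bClose st.1 c p.1, none)

def split_idx_alt (vec : List Int) : List Int :=
  let st := (PySem.List.enumerate vec 0).foldl bStep (none, none)
  let best :=
    match st.2 with
    | none => st.1
    | some c => bClose st.1 c ((vec.length : Int))
  match best with
  | some b => [b.1, b.2]
  | none => []   -- B raises ValueError here (no nonzero run; excluded by Pre_)

-- ===== PRECONDITION & SPEC =====
-- Pre_ excludes exactly the inputs where A raises: the empty list (IndexError at vec[0])
-- and all-zero vectors (ValueError from max([])).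
def Pre_split_idx (vec : List Int) : Prop := vec ≠ [] ∧ ∃ x ∈ vec, x ≠ 0
instance (vec : List Int) : Decidable (Pre_split_idx vec) := by unfold Pre_split_idx; infer_instance
def pvWitness_split_idx : List Int := [0, 3, 5, 0, 7]

def Spec_split_idx (vec : List Int) (out : List Int) : Prop := out = split_idx_alt vec
instance (vec : List Int) (out : List Int) : Decidable (Spec_split_idx vec out) := by unfold Spec_split_idx; infer_instance

-- ===== CLAIM (what is proved, stated in full; the proofs are below) =====
def Claim_equal_split_idx : Prop := ∀ (vec : List Int), Dom_split_idx vec → Pre_split_idx vec → Spec_split_idx vec (split_idx vec)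

-- ===== LEMMAS AND PROOFS =====

-- the list of maximal nonzero runs [start, stop) of xs, where xs begins at absolute
-- index i and `cur` records the start of a still-open run
def runsAux : List Int → Int → Option Int → List (Int × Int)
  | [], _, none => []
  | [], i, some c => [(c, i)]
  | x :: xs, i, none => if x = 0 then runsAux xs (i+1) none else runsAux xs (i+1) (some i)
  | x :: xs, i, some c => if x = 0 then (c, i) :: runsAux xs (i+1) none else runsAux xs (i+1) (some c)

def flatR (R : List (Int × Int)) : List Int := R.flatMap (fun p => [p.1, p.2])

-- A's boundary loop, as pure structural recursion on the list
def AbodyPure : List Int → Int → Int → List Int → List Int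
  | [], _, _, acc => acc
  | x :: xs, i, prev, acc =>
      AbodyPure xs (i+1) x
        (if prev = 0 ∧ x ≠ 0 then acc ++ [i] else if prev ≠ 0 ∧ x = 0 then acc ++ [i] else acc)

def lastElem : Int → List Int → Int
  | prev, [] => prev
  | _, x :: xs => lastElem x xs

def dif (p : Int × Int) : Int := p.2 - p.1

-- first run of maximal length
def fm : List (Int × Int) → Option (Int × Int)
  | [] => none
  | r :: rs => match fm rs with
      | none => some r
      | some b => if dif b > dif r then some b else some r

lemma bridgeA (vec : List Int) : ∀ (m k : Nat) (acc : List Int), vec.length - (k+1) = m → k < vec.length →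
    (PySem.List.pyRange ((k : Int) + 1) ((vec.length : Int)) 1).foldl (Astep vec) acc
      = AbodyPure (vec.drop (k+1)) ((k : Int) + 1) (vec.getD k 0) acc := by
  intro m
  induction m with
  | zero =>
    intro k acc hm hk
    have h1 : vec.length = k + 1 := by omega
    rw [PySem.List.pyRange_one_eq_nil (by exact_mod_cast Nat.le_of_eq h1)]
    rw [List.drop_eq_nil_of_le (by omega)]
    simp [AbodyPure]
  | succ m ih =>
    intro k acc hm hk
    have hk1 : k + 1 < vec.length := by omega
    rw [PySem.List.pyRange_one_cons (by exact_mod_cast hk1)]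
    simp only [List.foldl_cons]
    have hstep : Astep vec acc ((k : Int) + 1)
        = (if vec.getD k 0 = 0 ∧ vec.getD (k+1) 0 ≠ 0 then acc ++ [(k : Int) + 1]
           else if vec.getD k 0 ≠ 0 ∧ vec.getD (k+1) 0 = 0 then acc ++ [(k : Int) + 1]
           else acc) := by
      unfold Astep
      have e1 : (k : Int) + 1 - 1 = ((k : Nat) : Int) := by omega
      have e2 : (k : Int) + 1 = (((k+1 : Nat)) : Int) := by push_cast; ring
      rw [e1, e2, PySem.List.pyGet?_natCast, PySem.List.pyGet?_natCast]
      rw [List.getElem?_eq_getElem (by omega), List.getElem?_eq_getElem hk1]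
      rw [List.getD_eq_getElem vec 0 (by omega), List.getD_eq_getElem vec 0 hk1]
    rw [hstep]
    rw [List.drop_eq_getElem_cons hk1]
    show _ = AbodyPure (vec[k+1] :: vec.drop (k+1+1)) ((k:Int)+1) (vec.getD k 0) acc
    unfold AbodyPure
    have := ih (k+1) (if vec.getD k 0 = 0 ∧ vec[k+1] ≠ 0 then acc ++ [(k : Int) + 1]
           else if vec.getD k 0 ≠ 0 ∧ vec[k+1] = 0 then acc ++ [(k : Int) + 1]
           else acc) (by omega) hk1
    have e3 : ((k+1 : Nat) : Int) = (k : Int) + 1 := by push_cast; ring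
    rw [e3] at this
    rw [List.getD_eq_getElem vec 0 hk1] at this ⊢
    rw [this]

lemma flat_some : ∀ (xs : List Int) (i c : Int),
    flatR (runsAux xs i (some c)) = c :: (flatR (runsAux xs i (some 0))).tail := by
  intro xs
  induction xs with
  | nil => intro i c; simp [runsAux, flatR]
  | cons x xs ih =>
    intro i c
    by_cases hx : x = 0
    · simp [runsAux, hx, flatR]
    · simp only [runsAux, if_neg hx]
      rw [ih (i+1) c, ih (i+1) 0]

lemma A3 : ∀ (xs : List Int) (i prev : Int) (acc : List Int),
    (if lastElem prev xs = 0 then AbodyPure xs i prev acc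
     else AbodyPure xs i prev acc ++ [i + (xs.length : Int)])
      = acc ++ (if prev = 0 then flatR (runsAux xs i none)
                else (flatR (runsAux xs i (some 0))).tail) := by
  intro xs
  induction xs with
  | nil =>
    intro i prev acc
    by_cases hp : prev = 0 <;> simp [lastElem, AbodyPure, runsAux, flatR, hp]
  | cons x xs ih =>
    intro i prev acc
    rw [show lastElem prev (x :: xs) = lastElem x xs from rfl]
    rw [show i + (((x :: xs).length : Int)) = i + 1 + (xs.length : Int) by
      simp [List.length_cons]; ring]
    rw [show AbodyPure (x :: xs) i prev acc
        = AbodyPure xs (i+1) x (if prev = 0 ∧ x ≠ 0 then acc ++ [i]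
            else if prev ≠ 0 ∧ x = 0 then acc ++ [i] else acc) from rfl]
    by_cases hp : prev = 0 <;> by_cases hx : x = 0
    · -- prev = 0, x = 0
      have hacc : (if prev = 0 ∧ x ≠ 0 then acc ++ [i]
          else if prev ≠ 0 ∧ x = 0 then acc ++ [i] else acc) = acc := by simp [hp, hx]
      rw [hacc, if_pos hp]
      rw [show runsAux (x :: xs) i none = runsAux xs (i+1) none by
        simp only [runsAux, if_pos hx]]
      have h := ih (i+1) x acc
      rw [if_pos hx] at h
      exact h
    · -- prev = 0, x ≠ 0
      have hacc : (if prev = 0 ∧ x ≠ 0 then acc ++ [i]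
          else if prev ≠ 0 ∧ x = 0 then acc ++ [i] else acc) = acc ++ [i] := by simp [hp, hx]
      rw [hacc, if_pos hp]
      rw [show runsAux (x :: xs) i none = runsAux xs (i+1) (some i) by
        simp only [runsAux, if_neg hx]]
      have h := ih (i+1) x (acc ++ [i])
      rw [if_neg hx] at h
      rw [h, flat_some xs (i+1) i]
      simp
    · -- prev ≠ 0, x = 0
      have hacc : (if prev = 0 ∧ x ≠ 0 then acc ++ [i]
          else if prev ≠ 0 ∧ x = 0 then acc ++ [i] else acc) = acc ++ [i] := by simp [hp, hx]
      rw [hacc, if_neg hp]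
      rw [show runsAux (x :: xs) i (some 0) = (0, i) :: runsAux xs (i+1) none by
        simp only [runsAux, if_pos hx]]
      have h := ih (i+1) x (acc ++ [i])
      rw [if_pos hx] at h
      rw [h]
      simp [flatR]
    · -- prev ≠ 0, x ≠ 0
      have hacc : (if prev = 0 ∧ x ≠ 0 then acc ++ [i]
          else if prev ≠ 0 ∧ x = 0 then acc ++ [i] else acc) = acc := by simp [hp, hx]
      rw [hacc, if_neg hp]
      rw [show runsAux (x :: xs) i (some 0) = runsAux xs (i+1) (some 0) by
        simp only [runsAux, if_neg hx]]
      have h := ih (i+1) x acc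
      rw [if_neg hx] at h
      exact h

lemma flat_length (R : List (Int × Int)) : (flatR R).length = 2 * R.length := by
  induction R with
  | nil => simp [flatR]
  | cons r rs ih => simp [flatR] at ih ⊢; omega

lemma flat_get1 : ∀ (R : List (Int × Int)) (j : Nat), j < R.length →
    (flatR R).getD (2*j) 0 = (R.getD j (0,0)).1 := by
  intro R
  induction R with
  | nil => intro j h; simp at h
  | cons r rs ih =>
    intro j h
    cases j with
    | zero => simp [flatR]
    | succ j =>
      have : 2 * (j + 1) = (2 * j) + 1 + 1 := by ring
      rw [this]
      simp only [flatR, List.flatMap_cons, List.cons_append, List.getD_cons_succ,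
        List.nil_append]
      exact ih j (by simpa using h)

lemma flat_get2 : ∀ (R : List (Int × Int)) (j : Nat), j < R.length →
    (flatR R).getD (2*j+1) 0 = (R.getD j (0,0)).2 := by
  intro R
  induction R with
  | nil => intro j h; simp at h
  | cons r rs ih =>
    intro j h
    cases j with
    | zero => simp [flatR]
    | succ j =>
      have : 2 * (j + 1) + 1 = ((2 * j) + 1) + 1 + 1 := by ring
      rw [this]
      simp only [flatR, List.flatMap_cons, List.cons_append, List.getD_cons_succ,
        List.nil_append]
      exact ih j (by simpa using h)

lemma pairs_eq (R : List (Int × Int)) :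
    (PySem.List.pyRange 0 ((R.length : Int)) 1).map
      (fun i => [PySem.List.pyGetD (flatR R) (i*2) 0, PySem.List.pyGetD (flatR R) (i*2+1) 0])
      = R.map (fun p => [p.1, p.2]) := by
  apply List.ext_getElem
  · simp [PySem.List.length_pyRange_one]
  · intro i h1 h2
    simp only [List.getElem_map, PySem.List.getElem_pyRange_one]
    have hi : i < R.length := by
      simpa [PySem.List.length_pyRange_one] using h2
    have e1 : (0 : Int) + (i : Int) = ((i : Nat) : Int) := by ring
    have e2 : ((i : Nat) : Int) * 2 = ((2*i : Nat) : Int) := by push_cast; ring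
    have e3 : ((i : Nat) : Int) * 2 + 1 = ((2*i+1 : Nat) : Int) := by push_cast; ring
    rw [e1, e3, e2, PySem.List.pyGetD_natCast, PySem.List.pyGetD_natCast]
    rw [flat_get1 R i hi, flat_get2 R i hi]
    rw [List.getD_eq_getElem R (0,0) hi]

lemma fmax : ∀ (rs : List (Int × Int)) (d : Int),
    (rs.map dif).foldl max d = (match fm rs with | none => d | some b => max d (dif b)) := by
  intro rs
  induction rs with
  | nil => intro d; simp [fm]
  | cons r rs ih =>
    intro d
    simp only [List.map_cons, List.foldl_cons]
    rw [ih (max d (dif r))]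
    cases h : fm rs with
    | none => simp [fm, h]
    | some b =>
      simp only [fm, h]
      by_cases hc : dif b > dif r
      · rw [if_pos hc]
        show max (max d (dif r)) (dif b) = max d (dif b)
        rw [max_assoc, show max (dif r) (dif b) = dif b from max_eq_right (le_of_lt hc)]
      · rw [if_neg hc]
        show max (max d (dif r)) (dif b) = max d (dif r)
        rw [max_assoc, show max (dif r) (dif b) = dif r from max_eq_left (by omega)]

lemma fm_ne_nil : ∀ (R : List (Int × Int)), R ≠ [] → ∃ b, fm R = some b := by
  intro R hR
  cases R with
  | nil => exact absurd rfl hR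
  | cons r rs =>
    cases h : fm rs with
    | none => exact ⟨r, by simp [fm, h]⟩
    | some b =>
      simp only [fm, h]
      split_ifs <;> exact ⟨_, rfl⟩

lemma max?_difs : ∀ (rs : List (Int × Int)) (b : Int × Int), fm rs = some b →
    PySem.List.max? (rs.map dif) (fun y => y) = some (dif b) := by
  intro rs b hb
  cases rs with
  | nil => simp [fm] at hb
  | cons r rs' =>
    rw [show ((r :: rs').map dif) = dif r :: rs'.map dif from rfl, PySem.List.max?_id_cons]
    rw [fmax rs' (dif r)]
    cases h : fm rs' with
    | none =>
      simp only [fm, h] at hb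
      injection hb with hb
      subst hb
      rfl
    | some b' =>
      simp only [fm, h] at hb
      by_cases hc : dif b' > dif r
      · rw [if_pos hc] at hb
        injection hb with hb
        subst hb
        show some (max (dif r) (dif b')) = some (dif b')
        rw [max_eq_right (le_of_lt hc)]
      · rw [if_neg hc] at hb
        injection hb with hb
        subst hb
        show some (max (dif r) (dif b')) = some (dif r)
        rw [show max (dif r) (dif b') = dif r from max_eq_left (by omega)]

lemma L1 : ∀ (R : List (Int × Int)), R ≠ [] →
    (match PySem.List.max? (R.map dif) (fun y => y) with
     | none => ([] : List Int)
     | some m =>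
       match PySem.List.index? (R.map dif) m with
       | some j => (PySem.List.pyGet? (R.map (fun p => [p.1, p.2])) (j : Int)).getD []
       | none => [])
    = (match fm R with | some b => [b.1, b.2] | none => []) := by
  intro R
  induction R with
  | nil => intro h; exact absurd rfl h
  | cons r rs ih =>
    intro _
    rcases eq_or_ne rs [] with h | h
    · subst h
      rw [max?_difs [r] r (by simp [fm])]
      show (match PySem.List.index? ([r].map dif) (dif r) with
        | some j => (PySem.List.pyGet? ([r].map (fun p => [p.1, p.2])) (j : Int)).getD []
        | none => []) = match fm [r] with | some b => [b.1, b.2] | none => []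
      rw [show ([r].map dif) = [dif r] from rfl, PySem.List.index?_cons_self]
      simp [fm]
    · obtain ⟨b, hb⟩ := fm_ne_nil rs h
      by_cases hcmp : dif b > dif r
      · have hfm : fm (r :: rs) = some b := by simp [fm, hb, hcmp]
        rw [max?_difs (r :: rs) b hfm, hfm]
        simp only []
        rw [show ((r :: rs).map dif) = dif r :: rs.map dif from rfl]
        have hne : dif r ≠ dif b := by omega
        rw [PySem.List.index?_cons_of_ne _ hne]
        have hmem : dif b ∈ rs.map dif := PySem.List.max?_mem (max?_difs rs b hb)
        have hsome : (PySem.List.index? (rs.map dif) (dif b)).isSome := by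
          rw [PySem.List.index?_isSome_iff]; exact hmem
        obtain ⟨j, hj⟩ := Option.isSome_iff_exists.mp hsome
        rw [hj]
        simp only [Option.map_some]
        have hih := ih h
        rw [max?_difs rs b hb] at hih
        simp only [] at hih
        rw [hj, hb] at hih
        rw [show ((r :: rs).map (fun p : Int × Int => [p.1, p.2]))
            = [r.1, r.2] :: rs.map (fun p => [p.1, p.2]) from rfl]
        rw [show ((j + 1 : Nat) : Int) = ((j : Nat) : Int) + 1 by push_cast; ring]
        rw [PySem.List.pyGet?_cons_succ]
        exact hih
      · have hfm : fm (r :: rs) = some r := by simp [fm, hb, hcmp]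
        rw [max?_difs (r :: rs) r hfm, hfm]
        simp only []
        rw [show ((r :: rs).map dif) = dif r :: rs.map dif from rfl, PySem.List.index?_cons_self]
        simp

def bestStep (best : Option (Int × Int)) (r : Int × Int) : Option (Int × Int) :=
  bClose best r.1 r.2

lemma bestStep_none (r : Int × Int) : bestStep none r = some r := by
  simp [bestStep, bClose]

lemma bestStep_some (b r : Int × Int) :
    bestStep (some b) r = if dif r > dif b then some r else some b := by
  simp [bestStep, bClose, dif]

def comb (b0 f : Option (Int × Int)) : Option (Int × Int) :=
  match f with
  | none => b0
  | some f' =>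
    match b0 with
    | none => some f'
    | some b => if dif f' > dif b then some f' else some b

lemma bfold_fm : ∀ (R : List (Int × Int)) (b0 : Option (Int × Int)),
    R.foldl bestStep b0 = comb b0 (fm R) := by
  intro R
  induction R with
  | nil => intro b0; cases b0 <;> simp [fm, comb]
  | cons r rs ih =>
    intro b0
    simp only [List.foldl_cons]
    rw [ih]
    cases b0 with
    | none =>
      rw [bestStep_none]
      cases h : fm rs with
      | none =>
        have hfm : fm (r :: rs) = some r := by simp [fm, h]
        rw [hfm]
        rfl
      | some b =>
        have hfm : fm (r :: rs) = if dif b > dif r then some b else some r := by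
          simp [fm, h]
        rw [hfm]
        by_cases hc2 : dif b > dif r
        · rw [if_pos hc2]
          show (if dif b > dif r then some b else some r) = some b
          rw [if_pos hc2]
        · rw [if_neg hc2]
          show (if dif b > dif r then some b else some r) = some r
          rw [if_neg hc2]
    | some b0v =>
      rw [bestStep_some]
      cases h : fm rs with
      | none =>
        have hfm : fm (r :: rs) = some r := by simp [fm, h]
        rw [hfm]
        by_cases hc : dif r > dif b0v
        · rw [if_pos hc]
          show comb (some r) none = comb (some b0v) (some r)
          show some r = if dif r > dif b0v then some r else some b0v
          rw [if_pos hc]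
        · rw [if_neg hc]
          show comb (some b0v) none = comb (some b0v) (some r)
          show some b0v = if dif r > dif b0v then some r else some b0v
          rw [if_neg hc]
      | some b =>
        have hfm : fm (r :: rs) = if dif b > dif r then some b else some r := by
          simp [fm, h]
        rw [hfm]
        by_cases hc : dif r > dif b0v <;> by_cases hc2 : dif b > dif r
        · rw [if_pos hc, if_pos hc2]
          show comb (some r) (some b) = comb (some b0v) (some b)
          show (if dif b > dif r then some b else some r)
              = if dif b > dif b0v then some b else some b0v
          rw [if_pos hc2, if_pos (show dif b > dif b0v by omega)]
        · rw [if_pos hc, if_neg hc2]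
          show comb (some r) (some b) = comb (some b0v) (some r)
          show (if dif b > dif r then some b else some r)
              = if dif r > dif b0v then some r else some b0v
          rw [if_neg hc2, if_pos hc]
        · rw [if_neg hc, if_pos hc2]
        · rw [if_neg hc, if_neg hc2]
          show comb (some b0v) (some b) = comb (some b0v) (some r)
          show (if dif b > dif b0v then some b else some b0v)
              = if dif r > dif b0v then some r else some b0v
          rw [if_neg (show ¬dif b > dif b0v by omega), if_neg hc]

lemma B2 : ∀ (xs : List Int) (i : Int) (best : Option (Int × Int)) (cur : Option Int),
    (match ((PySem.List.enumerate xs i).foldl bStep (best, cur)).2 with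
     | none => ((PySem.List.enumerate xs i).foldl bStep (best, cur)).1
     | some c => bClose ((PySem.List.enumerate xs i).foldl bStep (best, cur)).1 c (i + (xs.length : Int)))
      = (runsAux xs i cur).foldl bestStep best := by
  intro xs
  induction xs with
  | nil =>
    intro i best cur
    cases cur <;> simp [PySem.List.enumerate_nil, runsAux, bestStep]
  | cons x xs ih =>
    intro i best cur
    rw [PySem.List.enumerate_cons]
    simp only [List.foldl_cons]
    have hlen : i + ((x :: xs).length : Int) = (i + 1) + (xs.length : Int) := by
      simp; ring
    rw [hlen]
    by_cases hx : x = 0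
    · cases cur with
      | none =>
        have : bStep (best, none) (i, x) = (best, none) := by simp [bStep, hx]
        rw [this, runsAux, if_pos hx]
        exact ih (i+1) best none
      | some c =>
        have : bStep (best, some c) (i, x) = (bClose best c i, none) := by simp [bStep, hx]
        rw [this, runsAux, if_pos hx]
        simp only [List.foldl_cons]
        have : bestStep best (c, i) = bClose best c i := rfl
        rw [← this]
        exact ih (i+1) (bestStep best (c, i)) none
    · cases cur with
      | none =>
        have : bStep (best, none) (i, x) = (best, some i) := by simp [bStep, hx]
        rw [this, runsAux, if_neg hx]
        exact ih (i+1) best (some i)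
      | some c =>
        have : bStep (best, some c) (i, x) = (best, some c) := by simp [bStep, hx]
        rw [this, runsAux, if_neg hx]
        exact ih (i+1) best (some c)

lemma runs_ne_nil : ∀ (xs : List Int) (i : Int) (cur : Option Int),
    ((∃ x ∈ xs, x ≠ 0) ∨ cur ≠ none) → runsAux xs i cur ≠ [] := by
  intro xs
  induction xs with
  | nil =>
    intro i cur h
    cases cur with
    | none =>
      rcases h with ⟨x, hx, _⟩ | h
      · exact absurd hx (by simp)
      · exact absurd rfl h
    | some c => simp [runsAux]
  | cons x xs ih =>
    intro i cur h
    by_cases hx : x = 0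
    · cases cur with
      | none =>
        rw [runsAux, if_pos hx]
        apply ih
        left
        rcases h with ⟨y, hy, hy0⟩ | h
        · rcases List.mem_cons.mp hy with rfl | hy'
          · exact absurd hx hy0
          · exact ⟨y, hy', hy0⟩
        · exact absurd rfl h
      | some c => rw [runsAux, if_pos hx]; simp
    · cases cur with
      | none => rw [runsAux, if_neg hx]; exact ih _ _ (Or.inr (by simp))
      | some c => rw [runsAux, if_neg hx]; exact ih _ _ (Or.inr (by simp))

lemma lastElem_getLast? : ∀ (rest : List Int) (v0 : Int),
    (v0 :: rest).getLast? = some (lastElem v0 rest) := by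
  intro rest
  induction rest with
  | nil => intro v0; rfl
  | cons x xs ih =>
    intro v0
    rw [List.getLast?_cons_cons]
    exact ih x

lemma all2_eq (v0 : Int) (rest : List Int) :
    (if lastElem v0 rest = 0
      then AbodyPure rest 1 v0 (if v0 = 0 then [] else [0])
      else AbodyPure rest 1 v0 (if v0 = 0 then [] else [0]) ++ [1 + (rest.length : Int)])
    = flatR (runsAux (v0 :: rest) 0 none) := by
  have h3 := A3 rest 1 v0 (if v0 = 0 then [] else [0])
  by_cases hv0 : v0 = 0
  · rw [if_pos hv0] at h3 ⊢
    rw [h3, if_pos hv0]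
    rw [show runsAux (v0 :: rest) 0 none = runsAux rest 1 none by
      simp only [runsAux, if_pos hv0, zero_add]]
    simp
  · rw [if_neg hv0] at h3 ⊢
    rw [h3, if_neg hv0]
    rw [show runsAux (v0 :: rest) 0 none = runsAux rest 1 (some 0) by
      simp only [runsAux, if_neg hv0, zero_add]]
    rw [flat_some rest 1 0]
    simp

lemma getD_pair (p : Int × Int) :
    PySem.List.pyGetD [p.1, p.2] 1 0 - PySem.List.pyGetD [p.1, p.2] 0 0 = dif p := by
  rw [PySem.List.pyGetD_eq_getElem _ _ (by norm_num) (by simp),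
      PySem.List.pyGetD_eq_getElem _ _ (by norm_num) (by simp)]
  simp [dif]

-- ===== VERDICT (by name: the statement is the Claim_ definition above) =====
theorem split_idx_spec : Claim_equal_split_idx := by
  intro vec _ hpre
  obtain ⟨hne, hnz⟩ := hpre
  obtain ⟨v0, rest, rfl⟩ : ∃ v0 rest, vec = v0 :: rest := by
    cases vec with
    | nil => exact absurd rfl hne
    | cons a l => exact ⟨a, l, rfl⟩
  show split_idx (v0 :: rest) = split_idx_alt (v0 :: rest)
  have hRne : runsAux (v0 :: rest) 0 none ≠ [] := runs_ne_nil _ _ _ (Or.inl hnz)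
  obtain ⟨b, hb⟩ := fm_ne_nil (runsAux (v0 :: rest) 0 none) hRne
  -- B side: the scan returns the first longest run
  have hB : split_idx_alt (v0 :: rest) = [b.1, b.2] := by
    simp only [split_idx_alt]
    have h2 := B2 (v0 :: rest) 0 none none
    rw [zero_add] at h2
    rw [h2, bfold_fm _ none, hb]
    rfl
  -- A side: the boundary-list pipeline returns the first longest run too
  have hA : split_idx (v0 :: rest) = [b.1, b.2] := by
    have hget0 : PySem.List.pyGet? (v0 :: rest) 0 = some v0 := by
      simp
    have hlast : PySem.List.pyGet? (v0 :: rest) (-1) = some (lastElem v0 rest) := by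
      rw [PySem.List.pyGet?_neg_one, lastElem_getLast?]
    simp only [split_idx, hget0, hlast]
    have hbr := bridgeA (v0 :: rest) ((v0 :: rest).length - 1) 0
      (if v0 = 0 then [] else [0]) rfl (by simp)
    rw [show ((0 : Nat) : Int) + 1 = 1 by norm_num] at hbr
    simp only [List.drop_succ_cons, List.drop_zero, List.getD_cons_zero] at hbr
    rw [hbr]
    rw [show (((v0 :: rest).length : Int)) = 1 + (rest.length : Int) by
      rw [List.length_cons]; push_cast; ring]
    rw [all2_eq v0 rest]
    have hfd : PySem.Int.floordiv ((flatR (runsAux (v0 :: rest) 0 none)).length : Int) 2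
        = ((runsAux (v0 :: rest) 0 none).length : Int) := by
      rw [flat_length, PySem.Int.floordiv_eq_ediv_of_pos (by norm_num)]
      push_cast
      omega
    rw [hfd, pairs_eq (runsAux (v0 :: rest) 0 none)]
    rw [List.map_map]
    rw [show ((fun v => PySem.List.pyGetD v 1 0 - PySem.List.pyGetD v 0 0)
          ∘ fun p : Int × Int => [p.1, p.2])
        = fun p : Int × Int =>
            PySem.List.pyGetD [p.1, p.2] 1 0 - PySem.List.pyGetD [p.1, p.2] 0 0 from rfl]
    rw [List.map_congr_left (fun p _ => getD_pair p)]
    exact (L1 (runsAux (v0 :: rest) 0 none) hRne).trans (by rw [hb])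
  rw [hA, hB]
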